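-- pv_equiv track=rewrite | github.com/klinger/vintel | src/vi/dotlan.py | convert_region_name
-- ===== SOURCE A (Python) =====
-- def convert_region_name(name):
--     """
--         Converts a (system)name to the format that dotland uses
--     """
--     converted = []
--     next_upper = False
--
--     for index, char in enumerate(name):
--         if index == 0:
--             converted.append(char.upper())
--         else:
--             if char in (u" ", u"_"):
--                 char = "_"
--                 next_upper = True
--             else:
--                 if next_upper:
--                     char = char.upper()
--                 else:
--                     char = char.lower()
--                 next_upper = False
--             converted.append(char)
--     return u"".join(converted)
-- ===== SOURCE B (Python) =====
-- def convert_region_name(name):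
--     """Staged bulk-string passes: lowercase the tail, replace spaces by underscores, split on
--     '_', capitalize each piece after the first, rejoin, prepend name[0].upper()."""
--     if name == "":
--         return ""
--     pieces = name[1:].lower().replace(" ", "_").split("_")
--     pieces = [pieces[0]] + [p[:1].upper() + p[1:] for p in pieces[1:]]
--     return name[0].upper() + "_".join(pieces)
-- ===== Notes on version B (the rewrite author's own statement) =====
-- stated objective: alternative
-- what changed: Replaces A's single character loop with a next_upper state flag by staged declarative passes: lowercase the tail, replace spaces by underscores, split on the underscore separator, capitalize every piece after the first, and rejoin.
import Mathlib
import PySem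

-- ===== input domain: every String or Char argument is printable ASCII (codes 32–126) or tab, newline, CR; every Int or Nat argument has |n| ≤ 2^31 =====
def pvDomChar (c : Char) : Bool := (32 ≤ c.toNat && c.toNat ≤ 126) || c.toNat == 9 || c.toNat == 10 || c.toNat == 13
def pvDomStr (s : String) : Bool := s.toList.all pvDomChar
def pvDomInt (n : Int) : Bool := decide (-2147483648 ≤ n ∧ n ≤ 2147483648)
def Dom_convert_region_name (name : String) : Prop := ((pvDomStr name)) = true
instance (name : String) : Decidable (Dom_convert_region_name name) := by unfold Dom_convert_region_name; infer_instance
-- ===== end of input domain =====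

-- B replaces A's per-character loop with a next_upper flag by staged passes (lowercase
-- the tail, replace spaces by underscores, split, capitalize each later piece, rejoin);
-- same O(n), measurably faster in Python by a constant factor (bulk str methods).


-- ===== PORT A =====
-- loop body of A: state = (converted, next_upper), element = (index, char)
def cvrStep (st : List Char × Bool) (p : Int × Char) : List Char × Bool :=
  if p.1 = 0 then (st.1 ++ [PySem.Chars.upperChar p.2], st.2)
  else if p.2 = ' ' ∨ p.2 = '_' then (st.1 ++ ['_'], true)       -- char in (" ", "_")
  else if st.2 then (st.1 ++ [PySem.Chars.upperChar p.2], false)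
  else (st.1 ++ [PySem.Chars.lowerChar p.2], false)

def convert_region_name (name : String) : String :=
  -- ''.join(converted) over the accumulated 1-char pieces = String.ofList of the char list
  String.ofList ((PySem.List.enumerate name.toList 0).foldl cvrStep ([], false)).1

-- ===== PORT B =====
-- p[:1].upper() + p[1:]  (capitalize the first char of a piece)
def capPiece (p : List Char) : List Char := PySem.Chars.upper (p.take 1) ++ p.drop 1

def convert_region_name_alt (name : String) : String :=
  match name.toList with
  | [] => ""                                   -- if name == "": return ""
  | h :: rest =>                               -- rest = name[1:]
    -- pieces = name[1:].lower().replace(" ", "_").split("_")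
    let pieces := PySem.Chars.splitOn (PySem.Chars.replace (PySem.Chars.lower rest) [' '] ['_']) ['_']
    -- pieces = [pieces[0]] + [p[:1].upper() + p[1:] for p in pieces[1:]]
    -- (split of a non-empty separator is never empty, so pieces[0] = headD, pieces[1:] = tail)
    let pieces2 := [pieces.headD []] ++ pieces.tail.map capPiece
    -- name[0].upper() + "_".join(pieces)
    String.ofList (PySem.Chars.upperChar h :: PySem.Chars.join ['_'] pieces2)

-- ===== PRECONDITION & SPEC =====
def Spec_convert_region_name (name : String) (out : String) : Prop := out = convert_region_name_alt name
instance (name : String) (out : String) : Decidable (Spec_convert_region_name name out) := by unfold Spec_convert_region_name; infer_instance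

-- ===== CLAIM (what is proved, stated in full; the proofs are below) =====
def Claim_equal_convert_region_name : Prop := ∀ (name : String), Dom_convert_region_name name → Spec_convert_region_name name (convert_region_name name)

-- ===== LEMMAS AND PROOFS =====

-- A's loop on the characters after index 0, as a structural recursion
def cvrLoop : List Char → Bool → List Char
  | [], _ => []
  | c :: cs, flag =>
    if c = ' ' ∨ c = '_' then '_' :: cvrLoop cs true
    else (if flag then PySem.Chars.upperChar c else PySem.Chars.lowerChar c) :: cvrLoop cs false

lemma foldl_cvrStep (cs : List Char) : ∀ (acc : List Char) (flag : Bool) (i : Int), 0 < i →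
    ((PySem.List.enumerate cs i).foldl cvrStep (acc, flag)).1 = acc ++ cvrLoop cs flag := by
  induction cs with
  | nil => intro acc flag i _; simp [PySem.List.enumerate, cvrLoop]
  | cons c cs ih =>
    intro acc flag i hi
    rw [PySem.List.enumerate_cons, List.foldl_cons]
    have hi0 : ¬ (i = 0) := by omega
    by_cases hsep : c = ' ' ∨ c = '_'
    · simp only [cvrStep, hi0, hsep, if_true, if_false, cvrLoop]
      rw [ih (acc ++ ['_']) true (i + 1) (by omega)]
      simp
    · cases flag with
      | true =>
        simp only [cvrStep, hi0, hsep, if_false, cvrLoop, if_true]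
        rw [ih (acc ++ [PySem.Chars.upperChar c]) false (i + 1) (by omega)]
        simp
      | false =>
        simp only [cvrStep, hi0, hsep, if_false, cvrLoop, Bool.false_eq_true]
        rw [ih (acc ++ [PySem.Chars.lowerChar c]) false (i + 1) (by omega)]
        simp

-- Char facts ------------------------------------------------------------------

lemma char_le_iff_toNat (a b : Char) : (a ≤ b) ↔ a.toNat ≤ b.toNat := by
  rw [Char.le_def]; exact UInt32.le_iff_toNat_le ..

lemma upperChar_lowerChar (c : Char) :
    PySem.Chars.upperChar (PySem.Chars.lowerChar c) = PySem.Chars.upperChar c := by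
  have eA : 'A'.toNat = 65 := rfl
  have eZ : 'Z'.toNat = 90 := rfl
  have ea : 'a'.toNat = 97 := rfl
  have ez : 'z'.toNat = 122 := rfl
  simp only [PySem.Chars.upperChar, PySem.Chars.lowerChar, PySem.Chars.islower, PySem.Chars.isupper,
    Bool.and_eq_true, decide_eq_true_eq, char_le_iff_toNat, eA, eZ, ea, ez]
  by_cases h : 65 ≤ c.toNat ∧ c.toNat ≤ 90
  · rw [if_pos h]
    have hv : Nat.isValidChar (c.toNat + 32) := Or.inl (by omega)
    have ht : (Char.ofNat (c.toNat + 32)).toNat = c.toNat + 32 := by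
      rw [Char.toNat_ofNat, if_pos hv]
    rw [if_pos (by rw [ht]; omega), if_neg (by omega)]
    rw [ht, show c.toNat + 32 - 32 = c.toNat by omega, Char.ofNat_toNat]
  · rw [if_neg h]

-- lowerChar hits a non-lowercase-letter target d only at c = d itself
lemma lowerChar_eq_special (c d : Char)
    (hd : d.toNat < 65 ∨ (90 < d.toNat ∧ d.toNat < 97) ∨ 122 < d.toNat) :
    PySem.Chars.lowerChar c = d ↔ c = d := by
  have eA : 'A'.toNat = 65 := rfl
  have eZ : 'Z'.toNat = 90 := rfl
  have hinj : ∀ a b : Char, a = b ↔ a.toNat = b.toNat := fun a b => by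
    constructor
    · rintro rfl; rfl
    · intro h; exact Char.ofNat_toNat a ▸ Char.ofNat_toNat b ▸ congrArg Char.ofNat h
  simp only [PySem.Chars.lowerChar, PySem.Chars.isupper, Bool.and_eq_true, decide_eq_true_eq,
    char_le_iff_toNat, eA, eZ]
  by_cases h : 65 ≤ c.toNat ∧ c.toNat ≤ 90
  · rw [if_pos h]
    have hv : Nat.isValidChar (c.toNat + 32) := Or.inl (by omega)
    have ht : (Char.ofNat (c.toNat + 32)).toNat = c.toNat + 32 := by
      rw [Char.toNat_ofNat, if_pos hv]
    rw [hinj, hinj, ht]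
    omega
  · rw [if_neg h]

-- replace(" ", "_") is the charwise map ---------------------------------------

lemma replace_go_space (l : List Char) : ∀ (acc : List Char),
    PySem.Chars.replace.go [' '] ['_'] l.length l acc
      = acc.reverse ++ l.map (fun c => if c = ' ' then '_' else c) := by
  induction l with
  | nil =>
    intro acc
    show PySem.Chars.replace.go [' '] ['_'] 0 [] acc = _
    rw [PySem.Chars.replace.go]; simp
  | cons c t ih =>
    intro acc
    show PySem.Chars.replace.go [' '] ['_'] (t.length + 1) (c :: t) acc = _
    rw [PySem.Chars.replace.go]
    by_cases h : c = ' '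
    · simp only [List.isPrefixOf, h, BEq.rfl, Bool.true_and, if_true]
      show PySem.Chars.replace.go [' '] ['_'] t.length t ('_' :: acc) = _
      rw [ih ('_' :: acc)]
      simp
    · have hpre : [' '].isPrefixOf (c :: t) = false := by
        simp [List.isPrefixOf]; exact fun hc => absurd hc.symm h
      simp only [hpre, Bool.false_eq_true, if_false, List.map_cons, h]
      rw [ih (c :: acc)]
      simp

lemma replace_space (cs : List Char) :
    PySem.Chars.replace cs [' '] ['_'] = cs.map (fun c => if c = ' ' then '_' else c) := by
  rw [PySem.Chars.replace]
  simpa using replace_go_space cs []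

-- split("_") as a structural recursion -----------------------------------------

def mySplit : List Char → List Char → List (List Char)
  | pre, [] => [pre]
  | pre, c :: r => if c = '_' then pre :: mySplit [] r else mySplit (pre ++ [c]) r

lemma split_go_us (l : List Char) : ∀ (fuel : Nat) (cur : List Char) (acc : List (List Char)),
    l.length < fuel →
    PySem.Chars.splitOn.go ['_'] fuel l cur acc = acc.reverse ++ mySplit cur.reverse l := by
  induction l with
  | nil =>
    intro fuel cur acc h
    obtain ⟨f, rfl⟩ : ∃ f, fuel = f + 1 := ⟨fuel - 1, by omega⟩
    rw [PySem.Chars.splitOn.go]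
    simp [mySplit]
    omega
  | cons c r ih =>
    intro fuel cur acc h
    obtain ⟨f, rfl⟩ : ∃ f, fuel = f + 1 := ⟨fuel - 1, by omega⟩
    rw [PySem.Chars.splitOn.go]
    by_cases hc : c = '_'
    · simp only [List.isPrefixOf, hc, BEq.rfl, Bool.true_and, if_true]
      show PySem.Chars.splitOn.go ['_'] f r [] (cur.reverse :: acc) = _
      rw [ih f [] (cur.reverse :: acc) (by simp at h; omega)]
      simp [mySplit]
    · have hpre : ['_'].isPrefixOf (c :: r) = false := by
        simp [List.isPrefixOf]; exact fun h' => absurd h'.symm hc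
      simp only [hpre, Bool.false_eq_true, if_false]
      rw [ih f (c :: cur) acc (by simp at h ⊢; omega)]
      simp [mySplit, hc]

lemma splitOn_us (cs : List Char) : PySem.Chars.splitOn cs ['_'] = mySplit [] cs := by
  rw [PySem.Chars.splitOn]
  rw [split_go_us cs (cs.length + 1) [] [] (by omega)]
  simp

-- the shape of a split: first word, then the remaining pieces -------------------

def firstWord : List Char → List Char
  | [] => []
  | c :: r => if c = '_' then [] else c :: firstWord r

def restPieces : List Char → List (List Char)
  | [] => []
  | c :: r => if c = '_' then firstWord r :: restPieces r else restPieces r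

lemma mySplit_eq (m : List Char) : ∀ (pre : List Char),
    mySplit pre m = (pre ++ firstWord m) :: restPieces m := by
  induction m with
  | nil => intro pre; simp [mySplit, firstWord, restPieces]
  | cons c r ih =>
    intro pre
    by_cases hc : c = '_' <;>
      simp [mySplit, firstWord, restPieces, hc, ih]

-- join helpers ------------------------------------------------------------------

lemma join_cons_head (x : Char) (w : List Char) (t : List (List Char)) :
    PySem.Chars.join ['_'] ((x :: w) :: t) = x :: PySem.Chars.join ['_'] (w :: t) := by
  cases t with
  | nil => rw [PySem.Chars.join_singleton, PySem.Chars.join_singleton]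
  | cons q t => rw [PySem.Chars.join_cons_cons, PySem.Chars.join_cons_cons]; simp

lemma capPiece_nil : capPiece [] = [] := rfl

lemma capPiece_cons (x : Char) (w : List Char) :
    capPiece (x :: w) = PySem.Chars.upperChar x :: w := by
  simp [capPiece, PySem.Chars.upper]

-- the main correspondence: A's loop = capitalize-after-split of the mapped tail --

lemma loop_eq_join (cs : List Char) : ∀ (flag : Bool),
    cvrLoop cs flag
      = PySem.Chars.join ['_']
          ((if flag then capPiece (firstWord (cs.map (fun c => if PySem.Chars.lowerChar c = ' ' then '_' else PySem.Chars.lowerChar c)))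
            else firstWord (cs.map (fun c => if PySem.Chars.lowerChar c = ' ' then '_' else PySem.Chars.lowerChar c)))
            :: (restPieces (cs.map (fun c => if PySem.Chars.lowerChar c = ' ' then '_' else PySem.Chars.lowerChar c))).map capPiece) := by
  induction cs with
  | nil =>
    intro flag
    cases flag <;> simp [cvrLoop, firstWord, restPieces, capPiece_nil, PySem.Chars.join_singleton]
  | cons c r ih =>
    intro flag
    by_cases hsep : c = ' ' ∨ c = '_'
    · have hm : (if PySem.Chars.lowerChar c = ' ' then '_' else PySem.Chars.lowerChar c) = '_' := by
        rcases hsep with rfl | rfl <;> decide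
      simp only [cvrLoop, hsep, if_true, List.map_cons, hm, firstWord, restPieces]
      have iht := ih true
      rw [if_pos rfl] at iht
      rw [PySem.Chars.join_cons_cons, ← iht]
      cases flag <;> simp [capPiece_nil]
    · have hlow_us : ¬ PySem.Chars.lowerChar c = '_' := by
        rw [lowerChar_eq_special c '_' (by decide)]
        exact fun h => hsep (Or.inr h)
      have hlow_sp : ¬ PySem.Chars.lowerChar c = ' ' := by
        rw [lowerChar_eq_special c ' ' (by decide)]
        exact fun h => hsep (Or.inl h)
      have hm : (if PySem.Chars.lowerChar c = ' ' then '_' else PySem.Chars.lowerChar c) = PySem.Chars.lowerChar c := if_neg hlow_sp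
      have ihf := ih false
      rw [if_neg (by simp)] at ihf
      simp only [cvrLoop, hsep, if_false, List.map_cons, hm, firstWord, restPieces, hlow_us,
        if_false]
      cases flag with
      | false =>
        rw [if_neg (by simp), if_neg (by simp), join_cons_head, ← ihf]
      | true =>
        rw [if_pos rfl, if_pos rfl, capPiece_cons, join_cons_head, upperChar_lowerChar, ← ihf]

-- ===== VERDICT (by name: the statement is the Claim_ definition above) =====
theorem convert_region_name_spec : Claim_equal_convert_region_name := by
  intro name _
  unfold Spec_convert_region_name convert_region_name convert_region_name_alt
  cases h : name.toList with
  | nil => rfl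
  | cons c cs =>
    rw [PySem.List.enumerate_cons, List.foldl_cons]
    have hstep : cvrStep ([], false) (0, c) = ([PySem.Chars.upperChar c], false) := by
      simp [cvrStep]
    rw [hstep, show (0:Int) + 1 = 1 from rfl,
      foldl_cvrStep cs [PySem.Chars.upperChar c] false 1 (by omega)]
    -- reduce B's staged pipeline
    have hrepl : PySem.Chars.replace (PySem.Chars.lower cs) [' '] ['_']
        = cs.map (fun c => if PySem.Chars.lowerChar c = ' ' then '_' else PySem.Chars.lowerChar c) := by
      rw [PySem.Chars.lower, replace_space, List.map_map]
      rfl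
    dsimp only
    rw [hrepl, splitOn_us, mySplit_eq _ []]
    simp only [List.headD_cons, List.tail_cons, List.nil_append, List.singleton_append]
    have := loop_eq_join cs false
    rw [if_neg (by simp)] at this
    rw [this]
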